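-- pv_equiv track=rewrite | github.com/hyunbeanohh/OIL-legacy-study | [프로그래머스 Al]/폰켓몬.py | solution
-- ===== SOURCE A (Python) =====
-- def solution(nums):
--     answer = 0
--     length = len(nums)//2
--     li = list(set(nums))
--
--     for i in li:
--         if answer < length:
--             answer += 1
--     return answer
-- ===== SOURCE B (Python) =====
-- def solution(nums):
--     return min(len(set(nums)), len(nums) // 2)
-- ===== Notes on version B (the rewrite author's own statement) =====
-- stated objective: simpler
-- what changed: Replaces the capped counting loop over the deduplicated list with the closed-form min(len(set(nums)), len(nums)//2).
import Mathlib
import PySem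

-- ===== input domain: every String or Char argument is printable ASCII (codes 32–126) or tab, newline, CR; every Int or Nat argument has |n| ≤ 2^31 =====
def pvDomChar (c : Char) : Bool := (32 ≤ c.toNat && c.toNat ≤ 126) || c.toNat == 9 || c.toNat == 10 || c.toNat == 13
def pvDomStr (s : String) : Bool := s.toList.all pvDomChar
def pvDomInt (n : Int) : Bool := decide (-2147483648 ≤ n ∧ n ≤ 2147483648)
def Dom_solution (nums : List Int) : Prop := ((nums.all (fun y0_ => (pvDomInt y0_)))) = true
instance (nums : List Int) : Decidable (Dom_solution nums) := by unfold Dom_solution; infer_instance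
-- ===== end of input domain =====

-- B replaces A's capped counting loop over the deduplicated list with the closed form
-- min(distinct count, len//2); objective: simpler.

-- ===== PORT A =====
-- for i in li: if answer < length: answer += 1  — result depends only on |li|, so folding
-- over PySem.Set.ofList nums (set(nums) in first-occurrence order) is order-safe.
def solution (nums : List Int) : Int :=
  let answer : Int := 0
  let length : Int := PySem.Int.floordiv (nums.length : Int) 2
  let li : PySem.Set Int := PySem.Set.ofList nums
  li.foldl (fun answer _ => if answer < length then answer + 1 else answer) answer

-- ===== PORT B =====
def solution_alt (nums : List Int) : Int :=
  min ((PySem.Set.ofList nums).length : Int) (PySem.Int.floordiv (nums.length : Int) 2)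

-- ===== PRECONDITION & SPEC =====
def Spec_solution (nums : List Int) (out : Int) : Prop := out = solution_alt nums
instance (nums : List Int) (out : Int) : Decidable (Spec_solution nums out) := by
  unfold Spec_solution; infer_instance

-- ===== CLAIM =====
def Claim_equal_solution : Prop := ∀ (nums : List Int), Dom_solution nums → Spec_solution nums (solution nums)

-- ===== LEMMAS AND PROOFS =====
-- counting fold capped at L, over any list, starting from a, yields min (a + n) L when a ≤ L
theorem cap_fold (l : List Int) (L a : Int) (ha : a ≤ L) :
    l.foldl (fun answer _ => if answer < L then answer + 1 else answer) a
      = min (a + l.length) L := by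
  induction l generalizing a with
  | nil => simp; omega
  | cons x xs ih =>
    simp only [List.foldl_cons, List.length_cons]
    by_cases h : a < L
    · rw [if_pos h, ih (a + 1) (by omega)]; omega
    · rw [if_neg h, ih a ha]; omega

-- ===== VERDICT =====
theorem solution_spec : Claim_equal_solution := by
  intro nums _
  unfold Spec_solution solution solution_alt
  have hL : (0 : Int) ≤ PySem.Int.floordiv (nums.length : Int) 2 := by
    simp [PySem.Int.floordiv]
    exact Int.fdiv_nonneg (by positivity) (by norm_num)
  rw [cap_fold _ _ _ hL]
  omega
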